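-- pv_equiv track=rewrite | github.com/amineChadli/autocorrector-challenge | bless_your_autocorrect.py | get_list_scores
-- ===== SOURCE A (Python) =====
-- def get_num_similar(ch1,ch2):
--   q = 1
--   while(ch1[:q]==ch2[:q] and q<=min(len(ch1),len(ch2))):
--     q+=1
--   return (q-1)
--
-- def dif(ch1,ch2):
--   return max(len(ch1),len(ch2)) - get_num_similar(ch1,ch2)
--
-- def get_list_scores(dict,word):
--     word_size = len(word)
--     list_scores = []
--     i = 1
--
--     while(i<=word_size):
--       ch = word[:i]
--       for j in range(0,len(dict)):
--         if(dict[j].startswith(ch)):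
--           list_scores.append((i,i+dif(word,dict[j]),j))
--           break
--       i+=1
--
--     return list_scores
-- ===== SOURCE B (Python) =====
-- def _lcp(word, d):
--     l = 0
--     while l < len(word) and l < len(d) and word[l] == d[l]:
--         l += 1
--     return l
--
-- def get_list_scores(dict, word):
--     W = len(word)
--     lcps = [_lcp(word, d) for d in dict]
--     # first[t] = smallest index j with lcps[j] == t (iterate backwards, overwriting)
--     first = {}
--     for j in range(len(dict) - 1, -1, -1):
--         first[lcps[j]] = j
--     # backward sweep over prefix lengths: best = smallest j with lcps[j] >= i
--     best = None
--     res = []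
--     for i in range(W, 0, -1):
--         f = first.get(i)
--         if f is not None and (best is None or f < best):
--             best = f
--         if best is not None:
--             j = best
--             res.append((i, i + max(W, len(dict[j])) - lcps[j], j))
--     res.reverse()
--     return res
-- ===== Notes on version B (the rewrite author's own statement) =====
-- stated objective: faster
-- what changed: Instead of re-scanning the dictionary (with a startswith plus a fresh character-by-character similarity loop) for every prefix length, B computes each entry's longest-common-prefix length with the word once, records the first index per exact lcp value in one backward pass, and obtains the first matching index for every prefix length by a single backward min-sweep over thresholds.
import Mathlib
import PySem

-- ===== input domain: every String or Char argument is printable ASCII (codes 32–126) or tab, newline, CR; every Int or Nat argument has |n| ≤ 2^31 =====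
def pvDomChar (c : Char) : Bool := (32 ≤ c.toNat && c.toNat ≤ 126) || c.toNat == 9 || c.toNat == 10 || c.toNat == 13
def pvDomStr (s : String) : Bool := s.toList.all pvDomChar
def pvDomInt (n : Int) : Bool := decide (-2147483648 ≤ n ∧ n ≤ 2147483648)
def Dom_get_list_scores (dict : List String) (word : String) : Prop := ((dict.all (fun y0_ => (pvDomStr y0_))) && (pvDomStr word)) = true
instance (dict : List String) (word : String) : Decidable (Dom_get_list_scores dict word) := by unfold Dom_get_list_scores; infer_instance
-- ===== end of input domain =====

-- B replaces A's per-prefix dictionary rescans (each with a fresh character-similarity loop) by one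
-- common-prefix computation per entry, a first-index-per-lcp-value table and one backward min-sweep.

-- ===== PORT A =====
-- while loop of get_num_similar; ch1[:q] with q ≥ 0 is List.take q (exact: q starts at 1 and only grows)
def pvA_gnsLoop (c1 c2 : List Char) (q : Nat) : Int :=
  if c1.take q = c2.take q ∧ q ≤ min c1.length c2.length then
    pvA_gnsLoop c1 c2 (q+1)
  else (q : Int) - 1
termination_by min c1.length c2.length + 2 - q
decreasing_by omega

def get_num_similar (ch1 ch2 : String) : Int := pvA_gnsLoop ch1.toList ch2.toList 1

def dif (ch1 ch2 : String) : Int :=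
  max (PySem.Str.len ch1) (PySem.Str.len ch2) - get_num_similar ch1 ch2

-- 'for j in range(0,len(dict)): if dict[j].startswith(ch): append; break' — first match only
def pvA_scan (word : String) (ch : List Char) (i : Nat) : List String → Nat → List (List Int)
  | [], _ => []
  | d :: ds, j =>
    if PySem.Chars.startswith d.toList ch then
      [[(i : Int), (i : Int) + dif word d, (j : Int)]]
    else pvA_scan word ch i ds (j+1)

-- the outer 'while i <= word_size' accumulating list_scores; word[:i] = take i (i ≥ 1)
def pvA_while (dict : List String) (word : String) (i : Nat) (acc : List (List Int)) : List (List Int) :=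
  if (i : Int) ≤ PySem.Str.len word then
    pvA_while dict word (i+1) (acc ++ pvA_scan word (word.toList.take i) i dict 0)
  else acc
termination_by word.toList.length + 1 - i
decreasing_by simp_all [PySem.Str.len_eq]; omega

def get_list_scores (dict : List String) (word : String) : List (List Int) :=
  pvA_while dict word 1 []

-- ===== PORT B =====
-- Source B's _lcp while loop; word[l] == d[l] is getD under the two preceding bounds guards (exact there)
def pvB_lcpLoop (w d : List Char) (l : Nat) : Nat :=
  if l < w.length ∧ l < d.length ∧ w.getD l 'a' = d.getD l 'a' then
    pvB_lcpLoop w d (l+1)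
  else l
termination_by w.length - l
decreasing_by omega

def pvB_lcp (word d : String) : Nat := pvB_lcpLoop word.toList d.toList 0

-- body of Source B's sweep loop: update best with first.get(i), then append the row if best exists
def pvB_step (first : PySem.Dict Nat Nat) (dict : List String) (lcps : List Nat) (W : Int)
    (st : Option Nat × List (List Int)) (i : Int) : Option Nat × List (List Int) :=
  let best := match first.get? i.toNat with
    | some f => match st.1 with
      | none => some f
      | some b => if f < b then some f else some b
    | none => st.1
  match best with
  | some j => (best, st.2 ++ [[i, i + max W (PySem.Str.len (dict.getD j "")) - (lcps.getD j 0 : Int), (j : Int)]])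
  | none => (best, st.2)

def get_list_scores_alt (dict : List String) (word : String) : List (List Int) :=
  let W := PySem.Str.len word
  let lcps := dict.map (fun d => pvB_lcp word d)
  -- first[lcps[j]] = j for j = len(dict)-1 .. 0 (backward, so the smallest j wins)
  let first := (PySem.List.pyRange ((dict.length : Int) - 1) (-1) (-1)).foldl
      (fun (f : PySem.Dict Nat Nat) j => f.insert (lcps.getD j.toNat 0) j.toNat) PySem.Dict.empty
  -- backward sweep over i = W .. 1 maintaining best = smallest j with lcps[j] >= i, appending rows
  let st := (PySem.List.pyRange W 0 (-1)).foldl (pvB_step first dict lcps W)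
      ((none : Option Nat), ([] : List (List Int)))
  st.2.reverse

-- ===== PRECONDITION & SPEC =====
def Spec_get_list_scores (dict : List String) (word : String) (out : List (List Int)) : Prop := out = get_list_scores_alt dict word
instance (dict : List String) (word : String) (out : List (List Int)) : Decidable (Spec_get_list_scores dict word out) := by unfold Spec_get_list_scores; infer_instance

-- ===== CLAIM (what is proved, stated in full; the proofs are below) =====
def Claim_equal_get_list_scores : Prop := ∀ (dict : List String) (word : String), Dom_get_list_scores dict word → Spec_get_list_scores dict word (get_list_scores dict word)

-- ===== LEMMAS AND PROOFS =====

-- longest common prefix length: the quantity both programs compute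
def lcp : List Char → List Char → Nat
  | a::as, b::bs => if a = b then lcp as bs + 1 else 0
  | _, _ => 0

@[simp] theorem lcp_nil_left (bs : List Char) : lcp [] bs = 0 := by cases bs <;> rfl
@[simp] theorem lcp_nil_right (as : List Char) : lcp as [] = 0 := by cases as <;> rfl
theorem lcp_cons_cons (a b : Char) (as bs : List Char) :
    lcp (a::as) (b::bs) = if a = b then lcp as bs + 1 else 0 := rfl

theorem lcp_le_left : ∀ (as bs : List Char), lcp as bs ≤ as.length := by
  intro as; induction as with
  | nil => intro bs; simp
  | cons a as ih => intro bs; cases bs with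
    | nil => simp
    | cons b bs =>
      have := ih bs
      rw [lcp_cons_cons]; simp only [List.length_cons]; split <;> omega

theorem lcp_le_right : ∀ (as bs : List Char), lcp as bs ≤ bs.length := by
  intro as; induction as with
  | nil => intro bs; simp
  | cons a as ih => intro bs; cases bs with
    | nil => simp
    | cons b bs =>
      have := ih bs
      rw [lcp_cons_cons]; simp only [List.length_cons]; split <;> omega

theorem lcp_self (as : List Char) : lcp as as = as.length := by
  induction as with
  | nil => simp
  | cons a as ih => rw [lcp_cons_cons]; simp [ih]

theorem take_eq_iff : ∀ (as bs : List Char) (q : Nat),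
    as.take q = bs.take q ↔ (q ≤ lcp as bs ∨ as = bs) := by
  intro as
  induction as with
  | nil =>
    intro bs q; cases bs with
    | nil => simp
    | cons b bs => cases q with
      | zero => simp
      | succ q => simp [List.take_succ_cons]
  | cons a as ih =>
    intro bs q; cases bs with
    | nil => cases q with
      | zero => simp
      | succ q => simp [List.take_succ_cons]
    | cons b bs => cases q with
      | zero => simp
      | succ q =>
        by_cases hab : a = b
        · subst hab
          simp only [List.take_succ_cons, List.cons.injEq, true_and, lcp_cons_cons, if_true]
          rw [ih bs q]
          constructor
          · rintro (h|h)
            · exact Or.inl (by omega)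
            · exact Or.inr h
          · rintro (h|h)
            · exact Or.inl (by omega)
            · exact Or.inr h
        · simp [List.take_succ_cons, lcp_cons_cons, hab]

theorem lcp_cond_iff : ∀ (as bs : List Char) (q : Nat), q ≤ lcp as bs →
    ((q < as.length ∧ q < bs.length ∧ as.getD q 'a' = bs.getD q 'a') ↔ q < lcp as bs) := by
  intro as
  induction as with
  | nil => intro bs q h; simp at h; simp [h]
  | cons a as ih =>
    intro bs q h; cases bs with
    | nil => simp at h; simp [h]
    | cons b bs =>
      by_cases hab : a = b
      · subst hab
        cases q with
        | zero => simp [lcp_cons_cons]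
        | succ q =>
          rw [lcp_cons_cons] at h
          simp only [if_true] at h
          have h' : q ≤ lcp as bs := by omega
          have := ih bs q h'
          rw [lcp_cons_cons]
          simp only [if_true, List.length_cons, List.getD_cons_succ, Nat.succ_lt_succ_iff]
          exact this
      · have hq : q = 0 := by
          rw [lcp_cons_cons] at h; rw [if_neg hab] at h; omega
        subst hq
        rw [lcp_cons_cons]; simp [hab]

theorem gnsLoop_eq_aux (c1 c2 : List Char) :
    ∀ (n q : Nat), lcp c1 c2 + 1 - q = n → 1 ≤ q → q ≤ lcp c1 c2 + 1 →
    pvA_gnsLoop c1 c2 q = (lcp c1 c2 : Int) := by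
  intro n
  induction n with
  | zero =>
    intro q hn h1 h2
    have hq : q = lcp c1 c2 + 1 := by omega
    subst hq
    rw [pvA_gnsLoop, if_neg]
    · push_cast; ring
    · rintro ⟨ht, hm⟩
      rw [take_eq_iff] at ht
      rcases ht with h|h
      · omega
      · rw [h, lcp_self] at hm; omega
  | succ n ih =>
    intro q hn h1 h2
    have hq : q ≤ lcp c1 c2 := by omega
    rw [pvA_gnsLoop, if_pos]
    · exact ih (q+1) (by omega) (by omega) (by omega)
    · constructor
      · rw [take_eq_iff]; exact Or.inl hq
      · have := lcp_le_left c1 c2; have := lcp_le_right c1 c2; omega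

theorem dif_eq (word d : String) :
    dif word d = ((max word.toList.length d.toList.length : Nat) : Int)
      - (lcp word.toList d.toList : Int) := by
  rw [dif, get_num_similar,
    gnsLoop_eq_aux word.toList d.toList (lcp word.toList d.toList) 1 (by omega) le_rfl (by omega)]
  simp [PySem.Str.len_eq, Nat.cast_max]

theorem lcpLoop_eq_aux (w d : List Char) :
    ∀ (n l : Nat), lcp w d - l = n → l ≤ lcp w d → pvB_lcpLoop w d l = lcp w d := by
  intro n
  induction n with
  | zero =>
    intro l hn hl
    have hle : l = lcp w d := by omega
    rw [pvB_lcpLoop, if_neg]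
    · exact hle
    · rw [lcp_cond_iff w d l hl]; omega
  | succ n ih =>
    intro l hn hl
    have hlt : l < lcp w d := by omega
    rw [pvB_lcpLoop, if_pos]
    · exact ih (l+1) (by omega) (by omega)
    · rw [lcp_cond_iff w d l hl]; exact hlt

theorem pvB_lcp_eq (word d : String) : pvB_lcp word d = lcp word.toList d.toList :=
  lcpLoop_eq_aux word.toList d.toList _ 0 rfl (Nat.zero_le _)

theorem take_prefix_iff (as bs : List Char) (i : Nat) (h : i ≤ as.length) :
    (as.take i <+: bs) ↔ i ≤ lcp as bs := by
  rw [List.prefix_iff_eq_take]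
  have hlen : (as.take i).length = i := by simp [List.length_take]; omega
  rw [hlen, take_eq_iff]
  constructor
  · rintro (hq | rfl)
    · exact hq
    · rw [lcp_self]; exact h
  · exact Or.inl

-- the 0-or-1-row contribution of prefix length i, phrased on the precomputed lcps
def rowOf (dict : List String) (lcps : List Nat) (W i : Nat) : List (List Int) :=
  match lcps.findIdx? (fun l => decide (i ≤ l)) with
  | some j => [[(i : Int), (i : Int) + ((max W (dict.getD j "").toList.length : Nat) : Int) - (lcps.getD j 0 : Int), (j : Int)]]
  | none => []

theorem scan_eq (word : String) (i : Nat) (hi : i ≤ word.toList.length) :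
    ∀ (ds : List String) (j0 : Nat),
    pvA_scan word (word.toList.take i) i ds j0 =
      match (ds.map (fun d => lcp word.toList d.toList)).findIdx? (fun l => decide (i ≤ l)) with
      | some k => [[(i : Int), (i : Int) + ((max word.toList.length (ds.getD k "").toList.length : Nat) : Int)
                    - (lcp word.toList (ds.getD k "").toList : Int), ((j0 + k : Nat) : Int)]]
      | none => [] := by
  intro ds
  induction ds with
  | nil => intro j0; simp [pvA_scan]
  | cons d ds ih =>
    intro j0
    by_cases hd : i ≤ lcp word.toList d.toList
    · have hsw : PySem.Chars.startswith d.toList (word.toList.take i) = true :=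
        (PySem.Chars.startswith_iff _ _).mpr ((take_prefix_iff _ _ _ hi).mpr hd)
      rw [pvA_scan, if_pos hsw]
      simp only [List.map_cons, List.findIdx?_cons, decide_eq_true_eq, if_pos hd]
      rw [dif_eq]
      simp only [List.getD_cons_zero, Nat.add_zero]
      rw [add_sub_assoc]
    · have hsw : PySem.Chars.startswith d.toList (word.toList.take i) = false := by
        rw [Bool.eq_false_iff]
        intro hc
        exact hd ((take_prefix_iff _ _ _ hi).mp ((PySem.Chars.startswith_iff _ _).mp hc))
      rw [pvA_scan, if_neg (by simp [hsw]), ih (j0+1)]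
      simp only [List.map_cons, List.findIdx?_cons, decide_eq_true_eq, if_neg hd]
      rcases hrest : (ds.map (fun d => lcp word.toList d.toList)).findIdx? (fun l => decide (i ≤ l)) with _ | k
      · simp only [hrest, Option.map_none]
      · simp only [hrest, Option.map_some, List.getD_cons_succ]
        have hj : j0 + 1 + k = j0 + (k + 1) := by omega
        rw [hj]

theorem while_eq (dict : List String) (word : String) :
    ∀ (n i : Nat) (acc : List (List Int)), i + n = word.toList.length + 1 → 1 ≤ i →
    pvA_while dict word i acc = acc ++
      ((List.range' i n).map (fun k =>
        rowOf dict (dict.map (fun d => lcp word.toList d.toList)) word.toList.length k)).flatten := by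
  intro n
  induction n with
  | zero =>
    intro i acc h h1
    have hc : ¬ ((i : Int) ≤ PySem.Str.len word) := by
      simp only [PySem.Str.len_eq]; omega
    rw [pvA_while, if_neg hc]; simp
  | succ n ih =>
    intro i acc h h1
    have hc : ((i : Int) ≤ PySem.Str.len word) := by
      simp only [PySem.Str.len_eq]; omega
    have hs : pvA_scan word (word.toList.take i) i dict 0 =
        rowOf dict (dict.map (fun d => lcp word.toList d.toList)) word.toList.length i := by
      rw [scan_eq word i (by omega) dict 0]
      unfold rowOf
      rcases hf : (dict.map (fun d => lcp word.toList d.toList)).findIdx? (fun l => decide (i ≤ l)) with _ | k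
      · rw [hf]
      · have hk : k < dict.length := by
          have := (List.findIdx?_eq_some_iff_findIdx_eq.mp hf).1
          simpa using this
        have h2 : (dict.map (fun d => lcp word.toList d.toList)).getD k 0
            = lcp word.toList ((dict.getD k "").toList) := by
          rw [List.getD_eq_getElem _ _ (by simpa using hk), List.getElem_map,
            List.getD_eq_getElem _ _ hk]
        rw [hf]
        simp only [Nat.zero_add, h2]
    rw [pvA_while, if_pos hc, ih (i+1) _ (by omega) (by omega), hs, List.range'_succ]
    simp [List.append_assoc]

-- ----- B side -----

theorem first_fold_get (lcps : List Nat) (t : Nat) :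
    ∀ (k : Nat) (acc : PySem.Dict Nat Nat), k ≤ lcps.length →
    ((PySem.List.pyRange ((k : Int) - 1) (-1) (-1)).foldl
        (fun (f : PySem.Dict Nat Nat) j => f.insert (lcps.getD j.toNat 0) j.toNat) acc).get? t
      = match (lcps.take k).findIdx? (fun l => decide (l = t)) with
        | some j => some j
        | none => acc.get? t := by
  intro k
  induction k with
  | zero =>
    intro acc _
    rw [show ((0 : Nat) : Int) - 1 = -1 by norm_num,
      PySem.List.pyRange_neg_one_eq_nil (le_refl (-1))]
    simp
  | succ k ih =>
    intro acc hk
    rw [show ((k+1 : Nat) : Int) - 1 = ((k : Nat) : Int) by push_cast; ring,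
      PySem.List.pyRange_neg_one_cons (by omega)]
    simp only [List.foldl_cons, Int.toNat_natCast]
    rw [ih _ (by omega)]
    have hkl : k < lcps.length := by omega
    have hlen : (lcps.take k).length = k := by simp [List.length_take]; omega
    rw [List.take_add_one, List.getElem?_eq_getElem hkl, List.findIdx?_append]
    rcases hf : (lcps.take k).findIdx? (fun l => decide (l = t)) with _ | j
    · simp only [Option.none_or]
      rw [PySem.Dict.get?_insert]
      have hg : lcps.getD k 0 = lcps[k] := List.getD_eq_getElem _ _ hkl
      by_cases ht : lcps[k] = t
      · rw [if_pos (by rw [hg]; exact ht.symm)]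
        simp [List.findIdx?_cons, ht, hlen]
      · rw [if_neg (by rw [hg]; exact fun hh => ht hh.symm)]
        simp [List.findIdx?_cons, ht]
    · simp

theorem minOpt_firstGe (t : Nat) : ∀ (ls : List Nat),
    (match ls.findIdx? (fun l => decide (l = t)) with
     | some f => match ls.findIdx? (fun l => decide (t + 1 ≤ l)) with
       | none => some f
       | some b => if f < b then some f else some b
     | none => ls.findIdx? (fun l => decide (t + 1 ≤ l)))
    = ls.findIdx? (fun l => decide (t ≤ l)) := by
  intro ls
  induction ls with
  | nil => simp
  | cons l ls ih =>
    simp only [List.findIdx?_cons, decide_eq_true_eq]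
    by_cases h1 : l = t
    · subst h1
      rw [if_pos rfl, if_neg (by omega), if_pos (le_refl l)]
      rcases hB : (ls.findIdx? (fun x => decide (l + 1 ≤ x))) with _ | b <;> simp
    · by_cases h2 : t + 1 ≤ l
      · rw [if_neg h1, if_pos h2, if_pos (by omega)]
        rcases hA : (ls.findIdx? (fun x => decide (x = t))) with _ | a <;> simp
      · rw [if_neg h1, if_neg h2, if_neg (by omega), ← ih]
        rcases hA : (ls.findIdx? (fun x => decide (x = t))) with _ | a <;>
          rcases hB : (ls.findIdx? (fun x => decide (t + 1 ≤ x))) with _ | b <;>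
          simp
        split_ifs <;> simp

def rowsDown (dict : List String) (lcps : List Nat) (W : Nat) : Nat → List (List Int)
  | 0 => []
  | t+1 => rowOf dict lcps W (t+1) ++ rowsDown dict lcps W t

theorem rowOf_reverse (dict : List String) (lcps : List Nat) (W x : Nat) :
    (rowOf dict lcps W x).reverse = rowOf dict lcps W x := by
  unfold rowOf
  rcases (lcps.findIdx? (fun l => decide (x ≤ l))) with _ | j <;> simp

theorem rowsDown_reverse (dict : List String) (lcps : List Nat) (W : Nat) : ∀ (t : Nat),
    (rowsDown dict lcps W t).reverse = ((List.range' 1 t).map (rowOf dict lcps W)).flatten := by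
  intro t
  induction t with
  | zero => simp [rowsDown]
  | succ t ih =>
    simp only [rowsDown, List.reverse_append, ih, rowOf_reverse, List.range'_concat, one_mul,
      List.map_append, List.flatten_append, List.map_cons, List.map_nil, List.flatten_cons,
      List.flatten_nil, List.append_nil]
    rw [Nat.add_comm 1 t]

theorem sweep_fold (dict : List String) (lcps : List Nat) (first : PySem.Dict Nat Nat) (W : Nat)
    (hfirst : ∀ u : Nat, first.get? u = lcps.findIdx? (fun l => decide (l = u))) :
    ∀ (t : Nat) (res : List (List Int)),
    (PySem.List.pyRange ((t : Nat) : Int) 0 (-1)).foldl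
        (pvB_step first dict lcps ((W : Nat) : Int))
        (lcps.findIdx? (fun l => decide (t + 1 ≤ l)), res)
      = (lcps.findIdx? (fun l => decide (1 ≤ l)), res ++ rowsDown dict lcps W t) := by
  intro t
  induction t with
  | zero =>
    intro res
    rw [PySem.List.pyRange_neg_one_eq_nil (by norm_num)]
    simp [rowsDown]
  | succ t ih =>
    intro res
    have hstep : pvB_step first dict lcps ((W : Nat) : Int)
          (lcps.findIdx? (fun l => decide (t + 1 + 1 ≤ l)), res) ((t+1 : Nat) : Int)
        = (lcps.findIdx? (fun l => decide (t + 1 ≤ l)), res ++ rowOf dict lcps W (t+1)) := by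
      simp only [pvB_step, Int.toNat_natCast, hfirst]
      rw [minOpt_firstGe (t+1) lcps]
      simp only [rowOf]
      rcases hB : lcps.findIdx? (fun l => decide (t + 1 ≤ l)) with _ | j
      · simp
      · simp [PySem.Str.len_eq, Nat.cast_max]
    rw [PySem.List.pyRange_neg_one_cons (by omega)]
    simp only [List.foldl_cons]
    rw [hstep, show ((t+1 : Nat) : Int) - 1 = ((t : Nat) : Int) by push_cast; ring,
      ih (res ++ rowOf dict lcps W (t+1))]
    simp [rowsDown, List.append_assoc]

theorem get_list_scores_eq (dict : List String) (word : String) :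
    get_list_scores dict word =
      ((List.range' 1 word.toList.length).map (fun k =>
        rowOf dict (dict.map (fun d => lcp word.toList d.toList)) word.toList.length k)).flatten := by
  unfold get_list_scores
  have := while_eq dict word word.toList.length 1 [] (by omega) le_rfl
  simpa only [List.nil_append] using this

theorem get_list_scores_alt_eq (dict : List String) (word : String) :
    get_list_scores_alt dict word =
      ((List.range' 1 word.toList.length).map (fun k =>
        rowOf dict (dict.map (fun d => lcp word.toList d.toList)) word.toList.length k)).flatten := by
  unfold get_list_scores_alt
  simp only [pvB_lcp_eq]
  have hfirst : ∀ u : Nat, ((PySem.List.pyRange ((dict.length : Int) - 1) (-1) (-1)).foldl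
      (fun (f : PySem.Dict Nat Nat) j =>
        f.insert ((dict.map (fun d => lcp word.toList d.toList)).getD j.toNat 0) j.toNat)
      PySem.Dict.empty).get? u
      = (dict.map (fun d => lcp word.toList d.toList)).findIdx? (fun l => decide (l = u)) := by
    intro u
    rw [first_fold_get _ u dict.length PySem.Dict.empty (by simp)]
    rw [List.take_of_length_le (by simp)]
    rcases hf : (dict.map (fun d => lcp word.toList d.toList)).findIdx? (fun l => decide (l = u)) with _ | j <;>
      simp [hf]
  have hnone : (dict.map (fun d => lcp word.toList d.toList)).findIdx?
      (fun l => decide (word.toList.length + 1 ≤ l)) = none := by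
    rw [List.findIdx?_eq_none_iff]
    intro x hx
    simp only [List.mem_map] at hx
    obtain ⟨d, _, rfl⟩ := hx
    have := lcp_le_left word.toList d.toList
    simp only [decide_eq_false_iff_not]
    omega
  rw [show PySem.Str.len word = ((word.toList.length : Nat) : Int) from PySem.Str.len_eq word]
  rw [show ((none : Option Nat), ([] : List (List Int)))
        = ((dict.map (fun d => lcp word.toList d.toList)).findIdx?
            (fun l => decide (word.toList.length + 1 ≤ l)), ([] : List (List Int))) by rw [hnone]]
  rw [sweep_fold dict _ _ word.toList.length hfirst word.toList.length []]
  simp only [List.nil_append]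
  rw [rowsDown_reverse]

-- ===== VERDICT (by name: the statement is the Claim_ definition above) =====
theorem get_list_scores_spec : Claim_equal_get_list_scores := by
  intro dict word _
  unfold Spec_get_list_scores
  rw [get_list_scores_eq, get_list_scores_alt_eq]
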